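-- pv_equiv track=rewrite | github.com/AjitSJune20/CWT-Project | APAC/resources/libraries/SyexCustomLibrary.py | are_there_duplicate_remarks
-- ===== SOURCE A (Python) =====
-- from collections import Counter, OrderedDict
--
-- def are_there_duplicate_remarks(pnr_details, gds):
--     # TODO
--     # implement check for other gds
--     """
--     Notes:
--     Amadeus - Remarks that starts with 'RM' will be checked
--     """
--     remarks_list = []
--     pnr_log = Counter(pnr_log.strip().lower() for pnr_log in pnr_details.split('\n') if pnr_log.strip())
--     for line in pnr_log:
--         if pnr_log[line] > 1:
--             if gds.lower() == 'amadeus' and line != 'rir *' and line.startswith("rm"):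
--                 # print 'duplicate remarks found: ' + line
--                 remarks_list.append(line)
--     return True if len(remarks_list) > 0 else False
-- ===== SOURCE B (Python) =====
-- def are_there_duplicate_remarks(pnr_details, gds):
--     # Single filtered pass with early exit: no Counter, no second scan.
--     if gds.lower() != 'amadeus':
--         return False
--     seen = set()
--     for line in pnr_details.split('\n'):
--         line = line.strip().lower()
--         if not line.startswith('rm'):
--             continue
--         if line in seen:
--             return True
--         seen.add(line)
--     return False
-- ===== Notes on version B (the rewrite author's own statement) =====
-- stated objective: simpler
-- what changed: Replaces count-everything-with-Counter-then-scan-distinct-keys by a single early-exit pass over the lines that keeps a 'seen' set of normalized 'rm' lines only, after an up-front gds gate; the redundant "!= 'rir *'" test (a line starting with 'rm' can never equal 'rir *') is dropped.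
import Mathlib
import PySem

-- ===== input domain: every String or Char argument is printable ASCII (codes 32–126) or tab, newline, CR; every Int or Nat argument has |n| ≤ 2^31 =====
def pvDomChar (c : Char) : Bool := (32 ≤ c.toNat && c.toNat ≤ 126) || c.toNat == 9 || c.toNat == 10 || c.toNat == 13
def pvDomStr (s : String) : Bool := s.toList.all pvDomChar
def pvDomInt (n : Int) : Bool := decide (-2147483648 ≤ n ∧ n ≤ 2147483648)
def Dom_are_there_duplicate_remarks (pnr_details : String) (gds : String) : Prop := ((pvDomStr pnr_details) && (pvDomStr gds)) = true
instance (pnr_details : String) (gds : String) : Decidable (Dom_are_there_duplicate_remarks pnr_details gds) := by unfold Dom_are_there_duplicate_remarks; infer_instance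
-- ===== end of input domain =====

-- B replaces A's Counter-then-scan-distinct-keys by one early-exit pass with a 'seen' set
-- behind an up-front gds gate (objective: simpler); same return value on every input.


-- ===== PORT A =====
def are_there_duplicate_remarks (pnr_details : String) (gds : String) : Bool :=
  -- remarks_list = []
  -- pnr_log = Counter(l.strip().lower() for l in pnr_details.split('\n') if l.strip())
  -- ('\n' is a nonempty separator, so split? is always `some`: the `.getD []` is never taken)
  let pnr_log : PySem.Dict String Int :=
    PySem.Dict.counter
      ((((PySem.Str.split? pnr_details "\n").getD []).filter
          (fun l => !(PySem.Str.strip l == ""))).map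
        (fun l => PySem.Str.lower (PySem.Str.strip l)))
  -- for line in pnr_log: if pnr_log[line] > 1:
  --   if gds.lower() == 'amadeus' and line != 'rir *' and line.startswith("rm"): remarks_list.append(line)
  let remarks_list : List String :=
    pnr_log.keys.foldl (fun acc line =>
      if pnr_log.getD line 0 > 1 then
        if PySem.Str.lower gds == "amadeus" && !(line == "rir *")
            && PySem.Str.startswith line "rm" then
          acc ++ [line]
        else acc
      else acc) []
  -- return True if len(remarks_list) > 0 else False
  if remarks_list.length > 0 then true else false

-- ===== PORT B =====
-- the early-exit scan: skip lines whose normalized form does not start with 'rm';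
-- return True on the first one already seen, else add it to the seen set
def pvAltLoop (seen : PySem.Set String) : List String → Bool
  | [] => false
  | l :: rest =>
    let line := PySem.Str.lower (PySem.Str.strip l)
    if PySem.Str.startswith line "rm" then
      if PySem.Set.contains seen line then true
      else pvAltLoop (PySem.Set.add seen line) rest
    else pvAltLoop seen rest

def are_there_duplicate_remarks_alt (pnr_details : String) (gds : String) : Bool :=
  if !(PySem.Str.lower gds == "amadeus") then false
  else pvAltLoop PySem.Set.empty ((PySem.Str.split? pnr_details "\n").getD [])

-- ===== PRECONDITION & SPEC =====
def Spec_are_there_duplicate_remarks (pnr_details : String) (gds : String) (out : Bool) : Prop := out = are_there_duplicate_remarks_alt pnr_details gds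
instance (pnr_details : String) (gds : String) (out : Bool) : Decidable (Spec_are_there_duplicate_remarks pnr_details gds out) := by unfold Spec_are_there_duplicate_remarks; infer_instance

-- ===== CLAIM (what is proved, stated in full; the proofs are below) =====
def Claim_equal_are_there_duplicate_remarks : Prop := ∀ (pnr_details : String) (gds : String), Dom_are_there_duplicate_remarks pnr_details gds → Spec_are_there_duplicate_remarks pnr_details gds (are_there_duplicate_remarks pnr_details gds)

-- ===== LEMMAS AND PROOFS =====

-- B's loop on the raw lines equals the same scan on the pre-normalized lines
def pvScan (seen : PySem.Set String) : List String → Bool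
  | [] => false
  | x :: rest =>
    if PySem.Str.startswith x "rm" then
      if PySem.Set.contains seen x then true
      else pvScan (PySem.Set.add seen x) rest
    else pvScan seen rest

lemma pvAltLoop_eq_scan (raws : List String) : ∀ seen,
    pvAltLoop seen raws
      = pvScan seen (raws.map (fun l => PySem.Str.lower (PySem.Str.strip l))) := by
  induction raws with
  | nil => intro seen; rfl
  | cons l rest ih => intro seen; simp only [pvAltLoop, pvScan, List.map_cons, ih]

-- the scan hits a repeat iff seen ++ (the 'rm' lines) is not duplicate-free
lemma pvScan_iff (xs : List String) : ∀ (seen : PySem.Set String), seen.Nodup →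
    (pvScan seen xs = true
      ↔ ¬ (seen ++ xs.filter (fun l => PySem.Str.startswith l "rm")).Nodup) := by
  induction xs with
  | nil => intro seen hs; simp [pvScan, hs]
  | cons x rest ih =>
    intro seen hs
    simp only [pvScan, List.filter_cons]
    by_cases hp : PySem.Str.startswith x "rm" = true
    · rw [if_pos hp, if_pos hp]
      by_cases hin : PySem.Set.contains seen x = true
      · have hmem : x ∈ seen := (PySem.Set.contains_iff _ _).mp hin
        rw [if_pos hin]
        simp only [true_iff]
        exact fun hnd => List.disjoint_of_nodup_append hnd hmem (List.mem_cons_self)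
      · have hnmem : x ∉ seen := fun hm => hin ((PySem.Set.contains_iff _ _).mpr hm)
        have hadd : PySem.Set.add seen x = seen ++ [x] := by
          simp [PySem.Set.add, hnmem]
        have hs' : (PySem.Set.add seen x).Nodup := by
          rw [hadd]
          exact hs.append (List.nodup_singleton _)
            (fun a ha hb => by simp at hb; subst hb; exact hnmem ha)
        rw [if_neg hin, ih _ hs', hadd, List.append_assoc, List.singleton_append]
    · rw [if_neg hp, if_neg hp]
      exact ih _ hs

-- the nonempty-after-strip filter of A is absorbed by the 'rm' filter
-- (an empty normalized line never starts with 'rm')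
lemma pv_filter_eq (raws : List String) :
    ((raws.filter (fun l => !(PySem.Str.strip l == ""))).map
        (fun l => PySem.Str.lower (PySem.Str.strip l))).filter
      (fun l => PySem.Str.startswith l "rm")
    = (raws.map (fun l => PySem.Str.lower (PySem.Str.strip l))).filter
        (fun l => PySem.Str.startswith l "rm") := by
  induction raws with
  | nil => rfl
  | cons l rest ih =>
    by_cases h : PySem.Str.strip l = ""
    · have hq : List.filter (fun l => !(PySem.Str.strip l == "")) (l :: rest)
          = List.filter (fun l => !(PySem.Str.strip l == "")) rest := by
        rw [List.filter_cons]; simp [h]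
      have hp : PySem.Str.startswith (PySem.Str.lower (PySem.Str.strip l)) "rm" = false := by
        rw [h]; rfl
      rw [hq, ih, List.map_cons, List.filter_cons, hp]
      simp
    · have hq : List.filter (fun l => !(PySem.Str.strip l == "")) (l :: rest)
          = l :: List.filter (fun l => !(PySem.Str.strip l == "")) rest := by
        rw [List.filter_cons]; simp [h]
      rw [hq, List.map_cons, List.map_cons, List.filter_cons, List.filter_cons, ih]

-- a duplicate exists among the 'rm' lines iff some 'rm' line occurs at least twice
lemma pv_dup_iff (ls : List String) :
    ¬ (ls.filter (fun l => PySem.Str.startswith l "rm")).Nodup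
      ↔ ∃ k, PySem.Str.startswith k "rm" = true ∧ 2 ≤ ls.count k := by
  rw [← List.exists_duplicate_iff_not_nodup]
  constructor
  · rintro ⟨x, hx⟩
    have hmem : x ∈ ls.filter (fun l => PySem.Str.startswith l "rm") := hx.mem
    have hpx : PySem.Str.startswith x "rm" = true := (List.mem_filter.mp hmem).2
    refine ⟨x, hpx, ?_⟩
    have := List.duplicate_iff_two_le_count.mp hx
    rwa [List.count_filter (p := fun l => PySem.Str.startswith l "rm") hpx] at this
  · rintro ⟨k, hpk, hc⟩
    exact ⟨k, List.duplicate_iff_two_le_count.mpr (by rwa [List.count_filter (p := fun l => PySem.Str.startswith l "rm") hpk])⟩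

-- a line starting with 'rm' is never 'rir *' (A's extra test is redundant)
lemma pvP_ne_rir {k : String} (h : PySem.Str.startswith k "rm" = true) :
    (k == "rir *") = false := by
  by_cases hk : k = "rir *"
  · subst hk; exact absurd h (by decide)
  · simp [hk]

-- the nested ifs of A's loop body as a single boolean test
lemma pv_if_if (c1 : Prop) [Decidable c1] (c2 : Bool) (acc : List String) (x : String) :
    (if c1 then (if c2 then acc ++ [x] else acc) else acc)
      = (if (decide c1 && c2) = true then acc ++ [id x] else acc) := by
  by_cases h : c1 <;> cases c2 <;> simp [h]

-- 'True if len(l) > 0 else False' as a proposition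
lemma pv_ite_tf (c : Prop) [Decidable c] : ((if c then true else false) = true) ↔ c := by simp

-- A's key loop is a filter over the counter's keys
lemma pv_foldl_eq (d : PySem.Dict String Int) (g : String) (keys : List String) :
    keys.foldl (fun acc line =>
        if d.getD line 0 > 1 then
          if PySem.Str.lower g == "amadeus" && !(line == "rir *")
              && PySem.Str.startswith line "rm" then acc ++ [line] else acc
        else acc) []
      = keys.filter (fun line => decide (d.getD line 0 > 1)
          && (PySem.Str.lower g == "amadeus" && !(line == "rir *")
              && PySem.Str.startswith line "rm")) := by
  rw [show (fun (acc : List String) (line : String) =>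
        if d.getD line 0 > 1 then
          if PySem.Str.lower g == "amadeus" && !(line == "rir *")
              && PySem.Str.startswith line "rm" then acc ++ [line] else acc
        else acc)
      = (fun acc line =>
        if (decide (d.getD line 0 > 1)
            && (PySem.Str.lower g == "amadeus" && !(line == "rir *")
                && PySem.Str.startswith line "rm")) = true
        then acc ++ [id line] else acc) from by
    funext acc line; exact pv_if_if _ _ _ _]
  rw [PySem.List.foldl_append_if]
  simp

-- ===== VERDICT (by name: the statement is the Claim_ definition above) =====
theorem are_there_duplicate_remarks_spec : Claim_equal_are_there_duplicate_remarks := by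
  intro pnr_details gds _
  unfold Spec_are_there_duplicate_remarks
  rw [Bool.eq_iff_iff]
  show ((if (List.foldl _ [] _).length > 0 then true else false) = true) ↔ _
  rw [pv_foldl_eq, pv_ite_tf]
  by_cases hg : PySem.Str.lower gds = "amadeus"
  · have hgb : (PySem.Str.lower gds == "amadeus") = true := by simp [hg]
    have hB : are_there_duplicate_remarks_alt pnr_details gds
        = pvAltLoop PySem.Set.empty ((PySem.Str.split? pnr_details "\n").getD []) := by
      simp [are_there_duplicate_remarks_alt, hgb]
    rw [hB, pvAltLoop_eq_scan,
        pvScan_iff _ PySem.Set.empty (by exact List.nodup_nil),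
        show PySem.Set.empty ++ ((((PySem.Str.split? pnr_details "\n").getD []).map
            (fun l => PySem.Str.lower (PySem.Str.strip l))).filter
          (fun l => PySem.Str.startswith l "rm"))
          = (((PySem.Str.split? pnr_details "\n").getD []).map
            (fun l => PySem.Str.lower (PySem.Str.strip l))).filter
          (fun l => PySem.Str.startswith l "rm") from List.nil_append _,
        ← pv_filter_eq, pv_dup_iff]
    rw [gt_iff_lt, List.length_pos_iff, Ne, List.filter_eq_nil_iff]
    push Not
    constructor
    · rintro ⟨k, hkmem, hcond⟩
      simp only [Bool.and_eq_true, decide_eq_true_eq] at hcond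
      obtain ⟨h1, _, h3⟩ := hcond
      refine ⟨k, h3, ?_⟩
      rw [PySem.Dict.getD_counter] at h1
      exact_mod_cast h1
    · rintro ⟨k, hpk, hc⟩
      refine ⟨k, ?_, ?_⟩
      · rw [PySem.Dict.keys_counter, PySem.Set.mem_ofList]
        exact List.count_pos_iff.mp (by omega)
      · simp only [Bool.and_eq_true, decide_eq_true_eq]
        refine ⟨?_, ⟨hgb, ?_⟩, hpk⟩
        · rw [PySem.Dict.getD_counter]
          exact_mod_cast hc
        · simp [pvP_ne_rir hpk]
  · have hgb : (PySem.Str.lower gds == "amadeus") = false := by simp [hg]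
    have hA0 : (List.filter (fun line => decide ((PySem.Dict.counter
          ((((PySem.Str.split? pnr_details "\n").getD []).filter
              (fun l => !(PySem.Str.strip l == ""))).map
            (fun l => PySem.Str.lower (PySem.Str.strip l)))).getD line 0 > 1)
          && (PySem.Str.lower gds == "amadeus" && !(line == "rir *")
              && PySem.Str.startswith line "rm"))
        (PySem.Dict.counter
          ((((PySem.Str.split? pnr_details "\n").getD []).filter
              (fun l => !(PySem.Str.strip l == ""))).map
            (fun l => PySem.Str.lower (PySem.Str.strip l)))).keys) = [] := by
      apply List.filter_eq_nil_iff.mpr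
      intro a _
      simp [hgb]
    have hB : are_there_duplicate_remarks_alt pnr_details gds = false := by
      simp [are_there_duplicate_remarks_alt, hgb]
    rw [hA0, hB]
    simp
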